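-- pv_equiv track=rewrite | github.com/eunsu-park/ap-project | regression/pipeline.py | split_by_class
-- ===== SOURCE A (Python) =====
-- from typing import Dict, List, Tuple, Optional, Any
--
-- def split_by_class(file_list: List[Tuple[str, int]]) -> Tuple[List[Tuple[str, int]], List[Tuple[str, int]]]:
--     """
--     Split file list into positive and negative samples.
--
--     Returns:
--         (positive_samples, negative_samples)
--     """
--     positive = []
--     negative = []
--
--     for file_name, label in file_list:
--         if label == 0:
--             negative.append((file_name, label))
--         else:
--             positive.append((file_name, label))
--
--     # Sort for reproducibility (independent of input order)
--     positive.sort(key=lambda x: x[0])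
--     negative.sort(key=lambda x: x[0])
--
--     return positive, negative
-- ===== SOURCE B (Python) =====
-- def split_by_class(file_list):
--     """
--     Split file list into positive and negative samples.
--
--     Returns:
--         (positive_samples, negative_samples)
--     """
--     positive = []
--     negative = []
--     for file_name, label in file_list:
--         target = negative if label == 0 else positive
--         # online insertion sort: insert after all existing entries whose
--         # name is <= this name (keeps input order among equal names, like
--         # a stable sort)
--         i = 0
--         while i < len(target) and target[i][0] <= file_name:
--             i += 1
--         target.insert(i, (file_name, label))
--     return positive, negative
-- ===== Notes on version B (the rewrite author's own statement) =====
-- stated objective: alternative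
-- what changed: B makes a single pass that inserts each pair directly into its class list at its sorted position (an online insertion sort with no final sort phase), instead of A's append-to-two-lists pass followed by two separate sorts; inserting after equal names reproduces stable-sort tie order.
import Mathlib
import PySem

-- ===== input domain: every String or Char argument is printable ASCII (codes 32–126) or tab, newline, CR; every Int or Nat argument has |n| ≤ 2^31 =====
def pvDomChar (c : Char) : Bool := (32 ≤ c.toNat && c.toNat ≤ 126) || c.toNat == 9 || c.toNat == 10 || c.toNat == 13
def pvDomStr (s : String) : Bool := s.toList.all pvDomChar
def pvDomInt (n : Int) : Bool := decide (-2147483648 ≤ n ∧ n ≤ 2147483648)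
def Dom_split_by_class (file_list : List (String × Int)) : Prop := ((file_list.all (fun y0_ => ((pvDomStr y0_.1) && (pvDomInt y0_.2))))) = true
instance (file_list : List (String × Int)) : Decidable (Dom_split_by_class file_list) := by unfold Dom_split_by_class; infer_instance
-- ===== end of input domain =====

-- B replaces A's partition-then-sort-twice with a single online insertion pass (no sort phase); objective: alternative.

-- ===== PORT A =====
-- A: one pass appending each (file_name, label) to negative (label == 0) or positive, then each list sorted by name.
def split_by_class (file_list : List (String × Int)) : (List (String × Int)) × (List (String × Int)) :=
  let pn := file_list.foldl
    (fun (acc : List (String × Int) × List (String × Int)) fl =>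
      if fl.2 == 0 then (acc.1, acc.2 ++ [(fl.1, fl.2)]) else (acc.1 ++ [(fl.1, fl.2)], acc.2))
    ([], [])
  (PySem.List.sorted pn.1 (fun x => x.1) false, PySem.List.sorted pn.2 (fun x => x.1) false)

-- ===== PORT B =====
-- B's inner while loop + insert: walk past all entries whose name is ≤ x's name, put x there.
def pvInsort (x : String × Int) : List (String × Int) → List (String × Int)
  | [] => [x]
  | y :: ys => if y.1 ≤ x.1 then y :: pvInsort x ys else x :: y :: ys

-- B: single pass, each pair inserted at its sorted position in its class list.
def split_by_class_alt (file_list : List (String × Int)) : (List (String × Int)) × (List (String × Int)) :=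
  file_list.foldl
    (fun (acc : List (String × Int) × List (String × Int)) fl =>
      if fl.2 == 0 then (acc.1, pvInsort (fl.1, fl.2) acc.2) else (pvInsort (fl.1, fl.2) acc.1, acc.2))
    ([], [])

-- ===== PRECONDITION & SPEC =====
def Spec_split_by_class (file_list : List (String × Int)) (out : (List (String × Int)) × (List (String × Int))) : Prop := out = split_by_class_alt file_list
instance (file_list : List (String × Int)) (out : (List (String × Int)) × (List (String × Int))) : Decidable (Spec_split_by_class file_list out) := by unfold Spec_split_by_class; infer_instance

-- ===== CLAIM (what is proved, stated in full; the proofs are below) =====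
def Claim_equal_split_by_class : Prop := ∀ (file_list : List (String × Int)), Dom_split_by_class file_list → Spec_split_by_class file_list (split_by_class file_list)

-- ===== LEMMAS AND PROOFS =====

-- B's insertion is PySem's insertBy with the "strictly greater name" test.
theorem pv_insort_eq_insertBy (x : String × Int) (l : List (String × Int)) :
    pvInsort x l = PySem.List.insertBy (fun a b => decide (a.1 < b.1)) x l := by
  induction l with
  | nil => rfl
  | cons y ys ih =>
    show pvInsort x (y :: ys)
        = if decide (x.1 < y.1) then x :: y :: ys else y :: PySem.List.insertBy _ x ys
    rw [pvInsort]
    by_cases h : y.1 ≤ x.1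
    · rw [if_pos h, if_neg (by simpa using not_lt.mpr h), ih]
    · rw [if_neg h, if_pos (by simpa using lt_of_not_ge h)]

-- A's partition loop is a pair of filters appended to the accumulators.
theorem pv_foldA (xs : List (String × Int)) (p n : List (String × Int)) :
    xs.foldl
      (fun (acc : List (String × Int) × List (String × Int)) fl =>
        if fl.2 == 0 then (acc.1, acc.2 ++ [(fl.1, fl.2)]) else (acc.1 ++ [(fl.1, fl.2)], acc.2))
      (p, n)
    = (p ++ xs.filter (fun fl => !(fl.2 == 0)), n ++ xs.filter (fun fl => fl.2 == 0)) := by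
  induction xs generalizing p n with
  | nil => simp
  | cons x xs ih =>
    obtain ⟨a, b⟩ := x
    by_cases h : b = 0
    · simp only [List.foldl_cons, h]
      rw [if_pos (by simp), ih]
      simp
    · simp only [List.foldl_cons]
      rw [if_neg (by simpa using h), ih]
      simp [h]

-- B's single pass splits into one insertion fold per class, over the filtered inputs.
theorem pv_foldB (xs : List (String × Int)) (p n : List (String × Int)) :
    xs.foldl
      (fun (acc : List (String × Int) × List (String × Int)) fl =>
        if fl.2 == 0 then (acc.1, pvInsort (fl.1, fl.2) acc.2) else (pvInsort (fl.1, fl.2) acc.1, acc.2))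
      (p, n)
    = ((xs.filter (fun fl => !(fl.2 == 0))).foldl (fun acc fl => pvInsort fl acc) p,
       (xs.filter (fun fl => fl.2 == 0)).foldl (fun acc fl => pvInsort fl acc) n) := by
  induction xs generalizing p n with
  | nil => simp
  | cons x xs ih =>
    obtain ⟨a, b⟩ := x
    by_cases h : b = 0
    · simp only [List.foldl_cons, h]
      rw [if_pos (by simp), ih]
      simp
    · simp only [List.foldl_cons]
      rw [if_neg (by simpa using h), ih]
      simp [h]

-- An insertion fold of ys is Python's stable sort of ys.
theorem pv_foldl_insort_eq_sorted (ys : List (String × Int)) :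
    ys.foldl (fun acc fl => pvInsort fl acc) []
    = PySem.List.sorted ys (fun x => x.1) false := by
  rw [PySem.List.sorted_eq_foldl_insertBy]
  exact PySem.List.foldl_congr_mem _ _ _ _ (fun acc fl _ => pv_insort_eq_insertBy fl acc)

-- ===== VERDICT (by name: the statement is the Claim_ definition above) =====
theorem split_by_class_spec : Claim_equal_split_by_class := by
  intro xs _
  unfold Spec_split_by_class split_by_class split_by_class_alt
  rw [pv_foldA xs [] [], pv_foldB xs [] []]
  simp [pv_foldl_insort_eq_sorted]
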